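-- pv_equiv track=rewrite | github.com/kuznetsovvj/education | algorithms/codeforces/1807g1.py | check
-- ===== SOURCE A (Python) =====
-- def check(seq):
--     if len(seq) == 1:
--         if seq[0] == 1:
--             return "YES"
--         return "NO"
--
--     t = max(seq)
--     idx_t = seq.index(t)
--     seq = seq[:idx_t] + seq[idx_t+1:]
--     l, r = 0, 0
--     current = seq[0]
--     while current != t:
--         if current < t:
--             if r == len(seq) - 1:
--                 return "NO"
--             r += 1
--             current += seq[r]
--             continue
--         if current > t:
--             current -= seq[l]
--             l += 1
--     if current == t:
--         return check(seq)
-- ===== SOURCE B (Python) =====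
-- def check(seq):
--     cur = list(seq)
--     while len(cur) > 1:
--         # one-pass argmax (value and first index)
--         best, bi = cur[0], 0
--         for i, v in enumerate(cur):
--             if v > best:
--                 best, bi = v, i
--         rest = cur[:bi] + cur[bi + 1:]
--         # prefix sums: p[k] = sum of rest[:k]
--         p = [0]
--         acc = 0
--         for v in rest:
--             acc += v
--             p.append(acc)
--         n = len(rest)
--         l = r = 0
--         ok = True
--         while p[r + 1] - p[l] != best:
--             if p[r + 1] - p[l] < best:
--                 if r == n - 1:
--                     ok = False
--                     break
--                 r += 1
--             else:
--                 l += 1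
--         if not ok:
--             return "NO"
--         cur = rest
--     return "YES" if cur[0] == 1 else "NO"
-- ===== Notes on version B (the rewrite author's own statement) =====
-- stated objective: alternative
-- what changed: The tail recursion becomes an explicit while loop over a fresh working list; max()+.index() are fused into one single-pass argmax over enumerate; and the incremental two-pointer accumulator is replaced by a prefix-sum array queried by pure index arithmetic.
import Mathlib
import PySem

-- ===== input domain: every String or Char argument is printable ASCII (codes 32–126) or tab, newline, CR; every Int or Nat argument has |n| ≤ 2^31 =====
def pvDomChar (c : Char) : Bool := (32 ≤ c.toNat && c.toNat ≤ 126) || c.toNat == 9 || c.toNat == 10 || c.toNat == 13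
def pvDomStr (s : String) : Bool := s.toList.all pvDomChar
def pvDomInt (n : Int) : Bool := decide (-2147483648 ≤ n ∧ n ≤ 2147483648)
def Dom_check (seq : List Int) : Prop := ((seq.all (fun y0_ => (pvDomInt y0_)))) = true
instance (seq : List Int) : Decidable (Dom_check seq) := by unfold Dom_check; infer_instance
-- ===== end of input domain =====

-- B restructures A (loop instead of tail recursion, fused one-pass argmax, prefix sums instead of
-- an incremental window accumulator); equivalence of the two ports is proved on nonempty lists.

-- ===== PORT A =====
-- A's inner 'while current != t' loop; returns false for the in-loop 'return "NO"', true when the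
-- loop exits (current == t).  Fuel bounds the iteration count (each step increases l + r, which the
-- caller's fuel 2*len+2 dominates); fuel exhaustion is unreachable from `check`.
-- The accesses seq[r+1] / seq[l] are in range whenever reached from `check` (the window keeps
-- l ≤ r < len because every element is ≤ t), so `getD … 0` returns exactly what Python's indexing does.
def checkScanA (s : List Int) (t : Int) : Nat → Nat → Nat → Int → Bool
  | 0, _, _, _ => false
  | fuel+1, l, r, current =>
    if current ≠ t then
      if current < t then
        if r == s.length - 1 then false
        else checkScanA s t fuel l (r+1) (current + PySem.List.pyGetD s (((r+1 : Nat) : Int)) 0)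
      else checkScanA s t fuel (l+1) r (current - PySem.List.pyGetD s ((l : Nat) : Int) 0)
    else true

def check (seq : List Int) : String :=
  if seq.length == 1 then
    if PySem.List.pyGetD seq 0 0 == 1 then "YES" else "NO"
  else
    match hm : PySem.List.max? seq (fun x => x) with
    | none => "NO"   -- seq = []: Python's max([]) raises ValueError (excluded by Pre_check)
    | some t =>
      let i : Nat := (PySem.List.index? seq t).getD 0   -- t ∈ seq, so index? is some
      let s := PySem.List.slice seq none (some (i : Int)) ++ PySem.List.slice seq (some ((i : Int) + 1)) none
      if checkScanA s t (2*s.length+2) 0 0 (PySem.List.pyGetD s 0 0) then check s else "NO"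
termination_by seq.length
decreasing_by
  · have ht : t ∈ seq := PySem.List.max?_mem hm
    obtain ⟨k, hk⟩ := Option.isSome_iff_exists.mp ((PySem.List.index?_isSome_iff seq t).mpr ht)
    obtain ⟨hklt, -, -⟩ := PySem.List.getElem_of_index?_eq_some hk
    simp only [hk, Option.getD_some]
    rw [show ((k : Int) + 1) = ((k + 1 : Nat) : Int) by push_cast; ring]
    simp only [PySem.List.slice_to_natCast, PySem.List.slice_from_natCast,
      List.length_append, List.length_take, List.length_drop]
    omega

-- ===== PORT B =====
-- one-pass argmax (value, first index) over enumerate, as in Source B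
def findMaxB (cur : List Int) : Int × Int :=
  (PySem.List.enumerate cur 0).foldl
    (fun (b : Int × Int) p => if p.2 > b.1 then (p.2, p.1) else b)
    (cur.getD 0 0, 0)

-- prefix-sum list p with p[k] = sum of rest[:k], built exactly as Source B's append loop
def prefixB (rest : List Int) : List Int :=
  (rest.foldl (fun (pa : List Int × Int) v => (pa.1 ++ [pa.2 + v], pa.2 + v)) ([0], 0)).1

-- Source B's inner while loop over the prefix sums; false = 'ok = False; break'
def checkScanB (p : List Int) (n : Nat) (t : Int) : Nat → Nat → Nat → Bool
  | 0, _, _ => false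
  | fuel+1, l, r =>
    if p.getD (r+1) 0 - p.getD l 0 ≠ t then
      if p.getD (r+1) 0 - p.getD l 0 < t then
        if r == n - 1 then false
        else checkScanB p n t fuel l (r+1)
      else checkScanB p n t fuel (l+1) r
    else true

-- the two lemmas below are needed by loopB's termination proof, hence stated above the port that cites them
theorem fm_aux (xs : List Int) : ∀ (b bi s : Int),
    (PySem.List.enumerate xs s).foldl
      (fun (b : Int × Int) p => if p.2 > b.1 then (p.2, p.1) else b) (b, bi) =
    if b < xs.foldl max b then (xs.foldl max b, s + (xs.idxOf (xs.foldl max b) : Int))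
    else (b, bi) := by
  induction xs with
  | nil => intro b bi s; simp
  | cons x l ih =>
    intro b bi s
    rw [PySem.List.enumerate_cons, List.foldl_cons]
    by_cases hx : x > b
    · simp only [List.foldl_cons, hx, if_pos, max_eq_right (le_of_lt hx)]
      rw [ih x s (s+1)]
      have hxM : x ≤ l.foldl max x := (PySem.List.le_foldl_max l x).1
      by_cases hlt : x < l.foldl max x
      · rw [if_pos hlt, if_pos (lt_trans hx hlt)]
        rw [List.idxOf_cons_ne _ (ne_of_lt hlt)]
        simp only [Nat.succ_eq_add_one, Prod.mk.injEq, true_and]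
        push_cast; ring
      · have hMx : l.foldl max x = x := le_antisymm (not_lt.mp hlt) hxM
        rw [if_neg hlt, hMx, if_pos hx, List.idxOf_cons_self]
        simp
    · have hxb : x ≤ b := not_lt.mp hx
      simp only [List.foldl_cons, hx, if_false, max_eq_left hxb]
      rw [ih b bi (s+1)]
      by_cases hlt : b < l.foldl max b
      · rw [if_pos hlt, if_pos hlt]
        rw [List.idxOf_cons_ne _ (ne_of_lt (lt_of_le_of_lt hxb hlt))]
        simp only [Nat.succ_eq_add_one, Prod.mk.injEq, true_and]
        push_cast; ring
      · rw [if_neg hlt, if_neg hlt]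

theorem findMaxB_eq (x : Int) (l : List Int) :
    findMaxB (x :: l) =
      (l.foldl max x, (((x :: l).idxOf (l.foldl max x) : Nat) : Int)) := by
  unfold findMaxB
  rw [PySem.List.enumerate_cons, List.foldl_cons]
  have hstep : (if ((0 : Int), x).2 > (((x :: l).getD 0 0 : Int), (0 : Int)).1
      then (((0 : Int), x).2, ((0 : Int), x).1)
      else (((x :: l).getD 0 0 : Int), (0 : Int))) = (x, (0 : Int)) := by
    simp
  rw [hstep, fm_aux l x 0 (0 + 1)]
  have hxM : x ≤ l.foldl max x := (PySem.List.le_foldl_max l x).1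
  by_cases hlt : x < l.foldl max x
  · rw [if_pos hlt, List.idxOf_cons_ne _ (ne_of_lt hlt)]
    simp only [Nat.succ_eq_add_one, Prod.mk.injEq, true_and]
    push_cast; ring
  · have hMx : l.foldl max x = x := le_antisymm (not_lt.mp hlt) hxM
    rw [if_neg hlt, hMx, List.idxOf_cons_self]
    simp

def loopB (cur : List Int) : String :=
  if h : cur.length > 1 then
    let bt := findMaxB cur
    let rest := PySem.List.slice cur none (some bt.2) ++ PySem.List.slice cur (some (bt.2 + 1)) none
    let p := prefixB rest
    if checkScanB p rest.length bt.1 (2*rest.length+2) 0 0 then loopB rest else "NO"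
  else
    if cur.getD 0 0 == 1 then "YES" else "NO"
termination_by cur.length
decreasing_by
  · match cur, h with
    | x :: l, _ =>
      have hidx := List.idxOf_lt_length_of_mem
        (show l.foldl max x ∈ x :: l by
          rcases PySem.List.foldl_max_mem l x with h' | h'
          · rw [h']; exact List.mem_cons_self
          · exact List.mem_cons_of_mem _ h')
      simp only [findMaxB_eq]
      rw [show ((List.idxOf (l.foldl max x) (x :: l) : Int) + 1) = (((List.idxOf (l.foldl max x) (x :: l) + 1 : Nat)) : Int) by push_cast; ring]
      simp only [PySem.List.slice_to_natCast, PySem.List.slice_from_natCast,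
        List.length_append, List.length_take, List.length_drop]
      omega

def check_alt (seq : List Int) : String := loopB seq   -- 'cur = list(seq)': the copy is the identity on values

-- ===== PRECONDITION & SPEC =====
-- Pre_check excludes only the empty list, on which Python's A raises ValueError (max of empty sequence).
def Pre_check (seq : List Int) : Prop := seq ≠ []
instance (seq : List Int) : Decidable (Pre_check seq) := by unfold Pre_check; infer_instance
def pvWitness_check : List Int := [1, 2, 3, 1]

def Spec_check (seq : List Int) (out : String) : Prop := out = check_alt seq
instance (seq : List Int) (out : String) : Decidable (Spec_check seq out) := by unfold Spec_check; infer_instance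

-- ===== CLAIM (what is proved, stated in full; the proofs are below) =====
def Claim_equal_check : Prop := ∀ (seq : List Int), Dom_check seq → Pre_check seq → Spec_check seq (check seq)

-- ===== LEMMAS AND PROOFS =====

-- the values Source B's append loop builds into p: psums a l = [a + sum of first k elements | k = 1..len]
def psums : Int → List Int → List Int
  | _, [] => []
  | a, v :: l => (a + v) :: psums (a + v) l

theorem prefixB_foldl : ∀ (l : List Int) (p0 : List Int) (a : Int),
    l.foldl (fun (pa : List Int × Int) v => (pa.1 ++ [pa.2 + v], pa.2 + v)) (p0, a) =
      (p0 ++ psums a l, a + l.sum) := by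
  intro l
  induction l with
  | nil => intro p0 a; simp [psums]
  | cons v l ih =>
    intro p0 a
    rw [List.foldl_cons, ih (p0 ++ [a + v]) (a + v)]
    simp [psums]
    ring

theorem length_psums : ∀ (l : List Int) (a : Int), (psums a l).length = l.length := by
  intro l; induction l with
  | nil => intro a; rfl
  | cons v l ih => intro a; simp [psums, ih]

theorem psums_getD : ∀ (l : List Int) (a : Int) (k : Nat), k < l.length →
    (psums a l).getD k 0 = a + (l.take (k + 1)).sum := by
  intro l
  induction l with
  | nil => intro a k hk; simp at hk
  | cons v l ih =>
    intro a k hk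
    cases k with
    | zero => simp [psums]
    | succ k =>
      simp only [psums, List.getD_cons_succ, List.take_succ_cons, List.sum_cons]
      rw [ih (a + v) k (by simpa using hk)]
      ring

theorem prefixB_getD (s : List Int) (k : Nat) :
    (prefixB s).getD k 0 = if k ≤ s.length then (s.take k).sum else 0 := by
  unfold prefixB
  rw [prefixB_foldl s [0] 0]
  cases k with
  | zero => simp
  | succ k =>
    by_cases hk : k < s.length
    · rw [if_pos (by omega)]
      have : ([(0 : Int)] ++ psums 0 s).getD (k + 1) 0 = (psums 0 s).getD k 0 := by simp
      rw [this, psums_getD s 0 k hk]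
      ring
    · rw [if_neg (by omega)]
      apply List.getD_eq_default
      simp [length_psums]; omega

-- A's window invariant: current is always the sum of s[l:r+1]; under it the two scans run in lockstep
theorem scan_eq (s : List Int) (t : Int) (hmax : ∀ y ∈ s, y ≤ t) :
    ∀ (fuel l r : Nat) (current : Int), l ≤ r → r < s.length →
      current = (s.take (r + 1)).sum - (s.take l).sum →
      checkScanA s t fuel l r current = checkScanB (prefixB s) s.length t fuel l r := by
  intro fuel
  induction fuel with
  | zero => intro l r current _ _ _; rfl
  | succ fuel ih =>
    intro l r current hlr hr hcur
    rw [checkScanA, checkScanB]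
    have hBr : (prefixB s).getD (r + 1) 0 = (s.take (r + 1)).sum := by
      rw [prefixB_getD]; rw [if_pos (by omega)]
    have hBl : (prefixB s).getD l 0 = (s.take l).sum := by
      rw [prefixB_getD]; rw [if_pos (by omega)]
    rw [hBr, hBl, ← hcur]
    by_cases hne : current ≠ t
    · rw [if_pos hne, if_pos hne]
      by_cases hlt : current < t
      · rw [if_pos hlt, if_pos hlt]
        by_cases hend : (r == s.length - 1) = true
        · rw [if_pos hend, if_pos hend]
        · rw [if_neg (by simp_all), if_neg (by simp_all)]
          have hr1 : r + 1 < s.length := by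
            have : r ≠ s.length - 1 := by simpa using hend
            omega
          apply ih l (r + 1) _ (by omega) hr1
          have hsr : (s.take (r + 1 + 1)).sum = (s.take (r + 1)).sum + s[r + 1] := by
            rw [List.take_add_one, List.sum_append, List.getElem?_eq_getElem hr1]; simp
          rw [hsr, hcur]
          simp only [PySem.List.pyGetD_natCast]
          rw [List.getD_eq_getElem?_getD, List.getElem?_eq_getElem hr1]
          simp; ring
      · rw [if_neg hlt, if_neg hlt]
        have hgt : t < current := by omega
        have hlr' : l < r := by
          rcases Nat.lt_or_ge l r with h | h
          · exact h
          · exfalso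
            have hlreq : l = r := by omega
            have hone : current = s[r] := by
              subst hlreq
              rw [hcur, List.take_add_one, List.sum_append, List.getElem?_eq_getElem hr]
              simp
            have := hmax s[r] (List.getElem_mem hr)
            omega
        apply ih (l + 1) r _ hlr' hr
        have hl : l < s.length := by omega
        have hsl : (s.take (l + 1)).sum = (s.take l).sum + s[l] := by
          rw [List.take_add_one, List.sum_append, List.getElem?_eq_getElem hl]; simp
        rw [hsl, hcur]
        simp only [PySem.List.pyGetD_natCast]
        rw [List.getD_eq_getElem?_getD, List.getElem?_eq_getElem hl]
        simp; ring
    · rw [if_neg hne, if_neg hne]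

theorem index?_eq_some_idxOf (l : List Int) (v : Int) (h : v ∈ l) :
    PySem.List.index? l v = some (l.idxOf v) := by
  induction l with
  | nil => simp at h
  | cons x l ih =>
    by_cases hx : x = v
    · subst hx; rw [PySem.List.index?_cons_self, List.idxOf_cons_self]
    · rw [PySem.List.index?_cons_of_ne _ hx, List.idxOf_cons_ne _ hx,
        ih (List.mem_of_ne_of_mem (fun hh => hx hh.symm) h)]
      rfl

theorem take_one_sum (l : List Int) : (l.take 1).sum = l.getD 0 0 := by
  cases l <;> simp

theorem check_eq_loopB (seq : List Int) : check seq = loopB seq := by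
  match hs : seq with
  | [] =>
    rw [check.eq_def, loopB.eq_def]
    simp [PySem.List.max?]
  | [x] =>
    rw [check.eq_def, loopB.eq_def]
    simp [PySem.List.pyGetD_zero]
  | x :: y :: l =>
    rw [check.eq_def, loopB.eq_def]
    rw [if_neg (by simp), dif_pos (by simp)]
    have hm : PySem.List.max? (x :: y :: l) (fun v => v) = some ((y :: l).foldl max x) :=
      PySem.List.max?_id_cons x (y :: l)
    split
    next heq => rw [hm] at heq; cases heq
    next t heq =>
      rw [hm] at heq
      have ht : t = (y :: l).foldl max x := (Option.some.inj heq).symm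
      subst ht
      set M := (y :: l).foldl max x with hMdef
      have hM : M ∈ x :: y :: l := PySem.List.max?_mem hm
      set k := (x :: y :: l).idxOf M with hkdef
      have hk : k < (x :: y :: l).length := List.idxOf_lt_length_of_mem hM
      have hcast : ((k : Int) + 1) = ((k + 1 : Nat) : Int) := by push_cast; ring
      rw [index?_eq_some_idxOf _ _ hM, ← hkdef]
      simp only [Option.getD_some, findMaxB_eq x (y :: l), ← hMdef, ← hkdef, hcast,
        PySem.List.slice_to_natCast, PySem.List.slice_from_natCast]
      set rest := (x :: y :: l).take k ++ (x :: y :: l).drop (k + 1) with hrest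
      have hrlen : 0 < rest.length := by
        rw [hrest]; simp at hk ⊢; omega
      have hmax : ∀ v ∈ rest, v ≤ M := by
        intro v hv
        apply PySem.List.max?_isMax hm
        rw [hrest] at hv
        rcases List.mem_append.mp hv with h | h
        · exact List.mem_of_mem_take h
        · exact List.mem_of_mem_drop h
      rw [scan_eq rest M hmax (2 * rest.length + 2) 0 0 (PySem.List.pyGetD rest 0 0)
        (le_refl 0) hrlen (by rw [PySem.List.pyGetD_zero, take_one_sum]; simp)]
      by_cases hscan : checkScanB (prefixB rest) rest.length M (2 * rest.length + 2) 0 0 = true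
      · rw [if_pos hscan, if_pos hscan]
        exact check_eq_loopB rest
      · rw [if_neg hscan, if_neg hscan]
termination_by seq.length
decreasing_by
  have hk' : List.idxOf (List.foldl max x (y :: l)) (x :: y :: l) < (x :: y :: l).length := hk
  simp only [List.length_append, List.length_take, List.length_drop]
  simp at hk' ⊢
  omega

-- ===== VERDICT (by name: the statement is the Claim_ definition above) =====
theorem check_spec : Claim_equal_check := by
  intro seq _ _
  unfold Spec_check check_alt
  exact check_eq_loopB seq
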